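-- pv_equiv track=rewrite | github.com/6529-Collections/6529seize-frontend | scripts/docs-area-remediator-local/validate_docs_optimizations.py | route_segments_match
-- ===== SOURCE A (Python) =====
-- def route_segments_match(route_segments: list[str], pattern_segments: list[str]) -> bool:
--     if not pattern_segments:
--         return not route_segments
--
--     head = pattern_segments[0]
--     tail = pattern_segments[1:]
--
--     if head == "{param}":
--         if not route_segments:
--             return False
--         return route_segments_match(route_segments[1:], tail)
--
--     if head == "{param+}":
--         if not route_segments:
--             return False
--         if not tail:
--             return True
--         for idx in range(1, len(route_segments) + 1):
--             if route_segments_match(route_segments[idx:], tail):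
--                 return True
--         return False
--
--     if head == "{param*}":
--         if not tail:
--             return True
--         for idx in range(0, len(route_segments) + 1):
--             if route_segments_match(route_segments[idx:], tail):
--                 return True
--         return False
--
--     if not route_segments:
--         return False
--     if route_segments[0] != head:
--         return False
--     return route_segments_match(route_segments[1:], tail)
-- ===== SOURCE B (Python) =====
-- def _suffix_any(row):
--     suf = []
--     acc = False
--     for v in reversed(row):
--         acc = acc or v
--         suf.append(acc)
--     suf.reverse()
--     return suf
--
--
-- def route_segments_match(route_segments: list[str], pattern_segments: list[str]) -> bool:
--     n = len(route_segments)
--     row = [j == n for j in range(n + 1)]  # row[j] = does route[j:] match the processed pattern suffix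
--     tail_empty = True
--     for head in reversed(pattern_segments):
--         if head == "{param}":
--             row = [j < n and row[j + 1] for j in range(n + 1)]
--         elif head == "{param+}":
--             suf = _suffix_any(row)
--             row = [j < n and (tail_empty or suf[j + 1]) for j in range(n + 1)]
--         elif head == "{param*}":
--             suf = _suffix_any(row)
--             row = [tail_empty or suf[j] for j in range(n + 1)]
--         else:
--             row = [j < n and route_segments[j] == head and row[j + 1] for j in range(n + 1)]
--         tail_empty = False
--     return row[0]
-- ===== Notes on version B (the rewrite author's own statement) =====
-- stated objective: alternative
-- what changed: Replaced A's top-down backtracking recursion with a bottom-up dynamic-programming table over route-suffix positions, processing the pattern right-to-left with a precomputed suffix-OR row.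
import Mathlib
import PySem

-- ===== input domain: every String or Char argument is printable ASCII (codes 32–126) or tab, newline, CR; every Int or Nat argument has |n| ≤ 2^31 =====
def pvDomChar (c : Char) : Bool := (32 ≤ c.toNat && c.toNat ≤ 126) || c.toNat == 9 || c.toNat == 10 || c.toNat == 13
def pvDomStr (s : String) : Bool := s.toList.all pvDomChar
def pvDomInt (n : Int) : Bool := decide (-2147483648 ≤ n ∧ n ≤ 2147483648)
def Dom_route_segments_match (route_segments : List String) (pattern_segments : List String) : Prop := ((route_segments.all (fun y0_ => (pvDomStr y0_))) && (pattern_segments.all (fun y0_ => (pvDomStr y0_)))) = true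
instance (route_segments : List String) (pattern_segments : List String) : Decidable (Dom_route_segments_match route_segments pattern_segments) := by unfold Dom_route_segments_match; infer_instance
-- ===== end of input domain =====

-- B: bottom-up dynamic programming over route-suffix positions (pattern processed
-- right-to-left, wildcard steps via a suffix-OR row) instead of A's backtracking recursion.

-- ===== PORT A =====
def route_segments_match (route_segments : List String) (pattern_segments : List String) : Bool :=
  match pattern_segments with
  | [] => route_segments.isEmpty
  | head :: tail =>
    if head = "{param}" then
      if route_segments.isEmpty then false
      else route_segments_match (route_segments.drop 1) tail
    else if head = "{param+}" then
      if route_segments.isEmpty then false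
      else if tail.isEmpty then true
      else
        -- range(1, len+1); early-return for-loop ported as .any (same left-to-right order)
        ((List.range route_segments.length).map (fun i => i + 1)).any
          (fun idx => route_segments_match (route_segments.drop idx) tail)
    else if head = "{param*}" then
      if tail.isEmpty then true
      else
        (List.range (route_segments.length + 1)).any
          (fun idx => route_segments_match (route_segments.drop idx) tail)
    else
      match route_segments with
      | [] => false
      | r0 :: rt => if r0 ≠ head then false else route_segments_match rt tail
termination_by pattern_segments.length
decreasing_by all_goals simp

-- ===== PORT B =====
-- transliteration of Source B's _suffix_any (append-then-final-reverse written as cons while scanning reversed)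
def sufAny (row : List Bool) : List Bool :=
  (row.reverse.foldl (fun (st : List Bool × Bool) v =>
      let acc := st.2 || v
      (acc :: st.1, acc)) ([], false)).1

-- one iteration of Source B's loop body; state = (row, tail_empty)
def rsmStep (route_segments : List String) (n : Nat) (st : List Bool × Bool) (head : String) :
    List Bool × Bool :=
  let row := st.1
  let tailEmpty := st.2
  let newRow :=
    if head = "{param}" then
      (List.range (n + 1)).map (fun j => decide (j < n) && row.getD (j + 1) false)
    else if head = "{param+}" then
      let suf := sufAny row
      (List.range (n + 1)).map (fun j => decide (j < n) && (tailEmpty || suf.getD (j + 1) false))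
    else if head = "{param*}" then
      let suf := sufAny row
      (List.range (n + 1)).map (fun j => tailEmpty || suf.getD j false)
    else
      (List.range (n + 1)).map (fun j =>
        decide (j < n) && decide (route_segments.getD j "" = head) && row.getD (j + 1) false)
  (newRow, false)

def route_segments_match_alt (route_segments : List String) (pattern_segments : List String) : Bool :=
  let n := route_segments.length
  let row0 := (List.range (n + 1)).map (fun j => decide (j = n))
  ((pattern_segments.reverse.foldl (rsmStep route_segments n) (row0, true)).1).getD 0 false

-- ===== PRECONDITION & SPEC =====
def Spec_route_segments_match (route_segments : List String) (pattern_segments : List String) (out : Bool) : Prop := out = route_segments_match_alt route_segments pattern_segments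
instance (route_segments : List String) (pattern_segments : List String) (out : Bool) : Decidable (Spec_route_segments_match route_segments pattern_segments out) := by unfold Spec_route_segments_match; infer_instance

-- ===== CLAIM (what is proved, stated in full; the proofs are below) =====
def Claim_equal_route_segments_match : Prop := ∀ (route_segments : List String) (pattern_segments : List String), Dom_route_segments_match route_segments pattern_segments → Spec_route_segments_match route_segments pattern_segments (route_segments_match route_segments pattern_segments)

-- ===== LEMMAS AND PROOFS =====

lemma getD_map_range {α : Type} (f : Nat → α) (m k : Nat) (d : α) :
    ((List.range m).map f).getD k d = if k < m then f k else d := by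
  by_cases h : k < m
  · simp [List.getD, h]
  · simp [List.getD, h]

lemma sufAny_fold (row : List Bool) :
    row.reverse.foldl (fun (st : List Bool × Bool) v =>
      let acc := st.2 || v
      (acc :: st.1, acc)) ([], false) = (sufAny row, row.any id) := by
  induction row with
  | nil => rfl
  | cons v t ih =>
    have h1 : sufAny (v :: t) = (t.any id || v) :: sufAny t := by
      unfold sufAny
      rw [List.reverse_cons, List.foldl_append, ih]
      rfl
    rw [List.reverse_cons, List.foldl_append, ih, h1]
    simp [Bool.or_comm]

lemma sufAny_cons (v : Bool) (t : List Bool) :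
    sufAny (v :: t) = (t.any id || v) :: sufAny t := by
  unfold sufAny
  rw [List.reverse_cons, List.foldl_append, sufAny_fold]
  rfl

lemma sufAny_getD (row : List Bool) (j : Nat) :
    (sufAny row).getD j false = (row.drop j).any id := by
  induction row generalizing j with
  | nil => cases j <;> rfl
  | cons v t ih =>
    cases j with
    | zero => simp [sufAny_cons, Bool.or_comm]
    | succ k => rw [sufAny_cons, List.getD_cons_succ, ih, List.drop_succ_cons]

lemma range_drop (n m : Nat) : (List.range n).drop m = List.range' m (n - m) := by
  induction m with
  | zero => simp [List.range_eq_range']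
  | succ k ih =>
    rw [← List.tail_drop, ih]
    rcases h : n - k with _ | j
    · have h0 : n - (k + 1) = 0 := by omega
      simp [h0]
    · have h0 : n - (k + 1) = j := by omega
      rw [List.range'_succ, h0]
      rfl

lemma any_drop_map_range (n s : Nat) (F : Nat → Bool) :
    (((List.range n).map F).drop s).any id = (List.range (n - s)).any (fun i => F (s + i)) := by
  rw [← List.map_drop, range_drop, List.range'_eq_map_range, List.any_map, List.any_map]
  rfl

-- A's result on each route suffix, as the DP row B maintains
lemma fold_eq (r : List String) (p : List String) :
    p.reverse.foldl (rsmStep r r.length)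
      ((List.range (r.length + 1)).map (fun j => decide (j = r.length)), true)
    = ((List.range (r.length + 1)).map (fun j => route_segments_match (r.drop j) p),
        decide (p = [])) := by
  induction p with
  | nil =>
    simp only [List.reverse_nil, List.foldl_nil, decide_eq_true_eq]
    refine Prod.ext ?_ (by simp)
    refine List.map_congr_left ?_
    intro j hj
    rw [List.mem_range] at hj
    rw [route_segments_match.eq_def]
    by_cases hd : j = r.length
    · rw [hd, List.drop_length]
      simp
    · have h2 : (List.drop j r).isEmpty = decide ((List.drop j r) = []) := by
        cases List.drop j r <;> rfl
      rw [h2, decide_eq_decide, List.drop_eq_nil_iff]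
      omega
  | cons h t ih =>
    rw [List.reverse_cons, List.foldl_append, ih, List.foldl_cons, List.foldl_nil]
    refine Prod.ext ?_ (by simp [rsmStep])
    show (rsmStep r r.length
        ((List.range (r.length + 1)).map (fun j => route_segments_match (r.drop j) t),
          decide (t = [])) h).1
      = (List.range (r.length + 1)).map (fun j => route_segments_match (r.drop j) (h :: t))
    simp only [rsmStep]
    by_cases hp1 : h = "{param}"
    · rw [if_pos hp1]
      refine List.map_congr_left ?_
      intro j hj
      rw [List.mem_range] at hj
      subst hp1
      by_cases hjn : j < r.length
      · rw [route_segments_match.eq_def]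
        simp [getD_map_range, hjn, Nat.succ_lt_succ hjn, List.drop_drop,
          List.isEmpty_iff, List.drop_eq_nil_iff, Nat.not_le.mpr hjn]
      · have hje : j = r.length := by omega
        rw [route_segments_match.eq_def]
        simp [hjn, hje, List.isEmpty_iff, List.drop_eq_nil_iff]
    · rw [if_neg hp1]
      by_cases hp2 : h = "{param+}"
      · rw [if_pos hp2]
        refine List.map_congr_left ?_
        intro j hj
        rw [List.mem_range] at hj
        subst hp2
        rw [sufAny_getD, any_drop_map_range]
        by_cases hjn : j < r.length
        · by_cases ht : t = []
          · rw [route_segments_match.eq_def]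
            simp [hjn, ht, List.isEmpty_iff, List.drop_eq_nil_iff, Nat.not_le.mpr hjn]
          · rw [route_segments_match.eq_def]
            have hfun : ∀ i : Nat, route_segments_match ((r.drop j).drop (i + 1)) t
                = route_segments_match (r.drop (j + 1 + i)) t := by
              intro i
              rw [List.drop_drop, show j + (i + 1) = j + 1 + i from by omega]
            have hne : ¬ (r.length ≤ j) := Nat.not_le.mpr hjn
            simp only [List.isEmpty_iff, List.drop_eq_nil_iff, ht, List.length_drop,
              List.any_map]
            simp [hne, ht, Function.comp_def, hfun]
            simp only [hjn, decide_true, Bool.true_and]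
            congr 1
            funext i
            rw [show j + (i + 1) = j + 1 + i from by omega]
        · have hje : j = r.length := by omega
          rw [route_segments_match.eq_def]
          simp [hjn, hje, List.isEmpty_iff, List.drop_eq_nil_iff]
      · rw [if_neg hp2]
        by_cases hp3 : h = "{param*}"
        · rw [if_pos hp3]
          refine List.map_congr_left ?_
          intro j hj
          rw [List.mem_range] at hj
          subst hp3
          rw [sufAny_getD, any_drop_map_range]
          by_cases ht : t = []
          · rw [route_segments_match.eq_def]
            simp [ht]
          · rw [route_segments_match.eq_def]
            have hfun : ∀ i : Nat, route_segments_match ((r.drop j).drop i) t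
                = route_segments_match (r.drop (j + i)) t := by
              intro i
              rw [List.drop_drop]
            rw [show r.length + 1 - j = r.length - j + 1 from by omega]
            simp only [ht, List.length_drop, List.any_map]
            simp [ht, Function.comp_def, hfun]
        · rw [if_neg hp3]
          refine List.map_congr_left ?_
          intro j hj
          rw [List.mem_range] at hj
          rw [route_segments_match.eq_def]
          simp only [if_neg hp1, if_neg hp2, if_neg hp3]
          by_cases hjn : j < r.length
          · have hlt : j < r.length := hjn
            rw [List.drop_eq_getElem_cons hlt]
            by_cases he : r[j] = h
            · simp [getD_map_range, hjn, Nat.succ_lt_succ hjn, he,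
                List.getD_eq_getElem _ _ hlt]
            · simp [getD_map_range, hjn, he,
                List.getD_eq_getElem _ _ hlt]
          · have hje : j = r.length := by omega
            rw [List.drop_eq_nil_iff.mpr (by omega)]
            simp [hjn]

-- ===== VERDICT (by name: the statement is the Claim_ definition above) =====
theorem route_segments_match_spec : Claim_equal_route_segments_match := by
  intro r p _
  unfold Spec_route_segments_match route_segments_match_alt
  show route_segments_match r p =
    ((p.reverse.foldl (rsmStep r r.length)
      ((List.range (r.length + 1)).map (fun j => decide (j = r.length)), true)).1).getD 0 false
  rw [fold_eq, getD_map_range]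
  simp
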